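-- pv_equiv track=rewrite | github.com/speedyb0y/mzk | deadbeef/trash/map-disk.py | name_to_code
-- ===== SOURCE A (Python) =====
-- ALPHABET = '0123456789abcdefghijklmnopqrstuvwxyzABCDEFGHIJKLMNOPQRSTUVWXYZ' # @$%#!,_-=+~^:[]{}()/ยง
--
-- def name_to_code (name):
--     exp = 1
--     code = 0
--     for L in name:
--         code += ALPHABET.index(L) * exp
--         exp *= len(ALPHABET)
--     assert 0 <= code <= 0xFFFFFFFFFFFFFFFF
--     return code
-- ===== SOURCE B (Python) =====
-- ALPHABET = '0123456789abcdefghijklmnopqrstuvwxyzABCDEFGHIJKLMNOPQRSTUVWXYZ'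
--
-- def name_to_code(name):
--     code = 0
--     for L in reversed(name):
--         code = code * len(ALPHABET) + ALPHABET.index(L)
--     assert 0 <= code <= 0xFFFFFFFFFFFFFFFF
--     return code
-- ===== Notes on version B (the rewrite author's own statement) =====
-- stated objective: alternative
-- what changed: Horner's method over the reversed string (multiply-accumulate, most-significant digit first), eliminating the running power-of-62 accumulator exp.
-- outside the precondition, e.g. on name_to_code('00000000000'): A returns 0, B returns 0
import Mathlib
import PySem

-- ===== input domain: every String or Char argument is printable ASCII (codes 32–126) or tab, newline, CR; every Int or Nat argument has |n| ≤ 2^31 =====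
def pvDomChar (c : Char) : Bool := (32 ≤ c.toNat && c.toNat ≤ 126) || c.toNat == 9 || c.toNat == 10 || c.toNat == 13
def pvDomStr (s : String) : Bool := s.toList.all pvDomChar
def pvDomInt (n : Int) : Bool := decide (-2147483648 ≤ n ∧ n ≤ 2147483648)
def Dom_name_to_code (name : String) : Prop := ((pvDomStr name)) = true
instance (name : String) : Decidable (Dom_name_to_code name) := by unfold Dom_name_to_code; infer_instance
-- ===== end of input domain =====

-- ===== PORT A =====
-- B changes the decomposition: Horner's method over the reversed string instead of a running power accumulator; same cost.
-- Both ports are exact on Pre_ (all chars in ALPHABET, so .index returns; the .getD 0 default is never reached there,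
-- and the assert of the Pythons always passes on Pre_).
def pvALPHABET : List Char :=
  "0123456789abcdefghijklmnopqrstuvwxyzABCDEFGHIJKLMNOPQRSTUVWXYZ".toList

-- ALPHABET.index(L): exact where L ∈ ALPHABET (Pre_ guarantees it; Python raises ValueError otherwise)
def pvIdx (L : Char) : Int := ((PySem.List.index? pvALPHABET L).getD 0 : Nat)

def name_to_code (name : String) : Int :=
  let st := name.toList.foldl
    (fun (st : Int × Int) L => (st.1 * (pvALPHABET.length : Int), st.2 + pvIdx L * st.1))
    (1, 0)  -- (exp, code)
  st.2

-- ===== PORT B =====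
def name_to_code_alt (name : String) : Int :=
  name.toList.reverse.foldl
    (fun code L => code * (pvALPHABET.length : Int) + pvIdx L) 0

-- ===== PRECONDITION & SPEC =====
-- Pre_ excludes inputs where A raises: a char outside ALPHABET (ValueError from .index) and strings long enough
-- to overflow the assert bound. The length bound ≤ 10 guarantees code ≤ 62^10-1 < 2^64, so the assert passes;
-- it is slightly narrower than the assert itself (e.g. '00000000000' passes A's assert and returns 0, as B does there).
def Pre_name_to_code (name : String) : Prop :=
  (name.toList.all (fun c => pvALPHABET.contains c) = true) ∧ name.toList.length ≤ 10
instance (name : String) : Decidable (Pre_name_to_code name) := by unfold Pre_name_to_code; infer_instance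
def pvWitness_name_to_code : String := "7a"

def Spec_name_to_code (name : String) (out : Int) : Prop := out = name_to_code_alt name
instance (name : String) (out : Int) : Decidable (Spec_name_to_code name out) := by unfold Spec_name_to_code; infer_instance

-- ===== CLAIM (what is proved, stated in full; the proofs are below) =====
def Claim_equal_name_to_code : Prop := ∀ (name : String), Dom_name_to_code name → Pre_name_to_code name → Spec_name_to_code name (name_to_code name)

-- ===== LEMMAS AND PROOFS =====
-- LSB-first value of a digit string
def pvVal : List Char → Int
  | [] => 0
  | L :: xs => pvIdx L + (pvALPHABET.length : Int) * pvVal xs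

theorem pvA_foldl (l : List Char) (e c : Int) :
    (l.foldl (fun (st : Int × Int) L => (st.1 * (pvALPHABET.length : Int), st.2 + pvIdx L * st.1)) (e, c)).2
      = c + e * pvVal l := by
  induction l generalizing e c with
  | nil => simp [pvVal]
  | cons x xs ih => simp only [List.foldl_cons, ih, pvVal]; ring

theorem pvB_foldr (l : List Char) :
    l.foldr (fun L code => code * (pvALPHABET.length : Int) + pvIdx L) 0 = pvVal l := by
  induction l with
  | nil => simp [pvVal]
  | cons x xs ih => simp only [List.foldr_cons, ih, pvVal]; ring

-- ===== VERDICT (by name: the statement is the Claim_ definition above) =====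
theorem name_to_code_spec : Claim_equal_name_to_code := by
  intro name _ _
  unfold Spec_name_to_code name_to_code name_to_code_alt
  rw [List.foldl_reverse, pvA_foldl]
  simp [pvB_foldr]
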